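-- pv_equiv track=rewrite | github.com/MrBrantCode/unitest_baseline | mut_generate/mist_train_taco/taco_15130/solution.py | find_original_string
-- ===== SOURCE A (Python) =====
-- def find_original_string(K, S):
--     """
--     Finds the original string before K swaps were performed on it.
--
--     Parameters:
--     K (int): The number of swaps performed by Watson.
--     S (str): The string Watson gives to Sherlock after performing K swaps.
--
--     Returns:
--     str: The original string before any swaps were performed.
--     """
--     def inverted_swap(s):
--         len_s = len(s)
--         if len_s % 2 == 0:
--             return s[::2] + s[-1::-2]
--         else:
--             return s[::2] + s[-2::-2]
--
--     orig_s = S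
--     cycle_duration = 0
--
--     while K > 0:
--         S = inverted_swap(S)
--         K -= 1
--         cycle_duration += 1
--         if S == orig_s:
--             K = K % cycle_duration
--
--     return S
-- ===== SOURCE B (Python) =====
-- def find_original_string(K, S):
--     n = len(S)
--     if K <= 0 or n <= 1:
--         return S
--     def p(i):
--         return 2 * i if 2 * i < n else 2 * (n - i) - 1
--     res = [''] * n
--     seen = [False] * n
--     for i in range(n):
--         if not seen[i]:
--             cyc = []
--             j = i
--             while not seen[j]:
--                 seen[j] = True
--                 cyc.append(j)
--                 j = p(j)
--             L = len(cyc)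
--             r = K % L
--             for idx in range(L):
--                 res[cyc[idx]] = S[cyc[(idx + r) % L]]
--     return ''.join(res)
-- ===== Notes on version B (the rewrite author's own statement) =====
-- stated objective: faster
-- what changed: A repeatedly rebuilds the whole string (inverse swap) K times with whole-string cycle detection; B never rebuilds the string: it derives the fixed index permutation p(i)=2i if 2i<n else 2(n-i)-1, finds each position's cycle length L, and reads the answer character at p^(K mod L)(i) directly.
import Mathlib
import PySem

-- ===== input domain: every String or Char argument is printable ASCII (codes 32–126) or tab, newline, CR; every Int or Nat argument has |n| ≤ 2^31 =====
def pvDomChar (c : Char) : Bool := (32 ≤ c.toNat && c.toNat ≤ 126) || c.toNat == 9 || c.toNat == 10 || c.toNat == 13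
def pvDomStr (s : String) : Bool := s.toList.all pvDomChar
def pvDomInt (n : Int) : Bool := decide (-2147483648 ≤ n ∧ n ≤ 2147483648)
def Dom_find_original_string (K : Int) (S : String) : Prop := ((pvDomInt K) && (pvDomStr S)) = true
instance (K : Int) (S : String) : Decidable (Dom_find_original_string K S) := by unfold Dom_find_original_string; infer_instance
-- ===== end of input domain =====

-- B replaces A's repeated whole-string swapping by per-position cycle walking of the fixed
-- index permutation with K reduced mod each cycle's length (objective: faster on large K).

-- ===== PORT A =====
-- inverted_swap(s): s[::2] + (s[-1::-2] if even length else s[-2::-2]), on the char list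
def pvInvertedSwap (s : List Char) : List Char :=
  let len_s : Int := PySem.Chars.len s
  if PySem.Int.mod len_s 2 = 0 then
    ((PySem.List.slice? s none none 2).getD []) ++ ((PySem.List.slice? s (some (-1)) none (-2)).getD [])
  else
    ((PySem.List.slice? s none none 2).getD []) ++ ((PySem.List.slice? s (some (-2)) none (-2)).getD [])

-- the 'while K > 0' loop; cycle_duration only ever grows from 0, so it is carried as a Nat
def pvLoopA (K : Int) (S orig : List Char) (cd : Nat) : List Char :=
  if h : 0 < K then
    if pvInvertedSwap S = orig then
      pvLoopA (PySem.Int.mod (K - 1) ((cd : Int) + 1)) (pvInvertedSwap S) orig (cd + 1)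
    else pvLoopA (K - 1) (pvInvertedSwap S) orig (cd + 1)
  else S
termination_by K.toNat
decreasing_by
  · have hb : (0:Int) < (cd : Int) + 1 := by positivity
    have h1 : PySem.Int.mod (K - 1) ((cd : Int) + 1) ≤ K - 1 := by
      rw [PySem.Int.mod_eq_emod_of_pos hb]
      rcases lt_or_ge (K - 1) ((cd : Int) + 1) with h2 | h2
      · rw [Int.emod_eq_of_lt (by omega) h2]
      · have := Int.emod_lt_of_pos (K - 1) hb; omega
    omega
  · omega

def find_original_string (K : Int) (S : String) : String :=
  String.ofList (pvLoopA K S.toList S.toList 0)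

-- ===== PORT B =====
-- p(i) = 2*i if 2*i < n else 2*(n-i)-1  (the index permutation one inverted_swap applies)
def pvP (n i : Nat) : Nat := if 2 * i < n then 2 * i else 2 * (n - i) - 1

-- 'cyc = []; j = i; while not seen[j]: seen[j] = True; cyc.append(j); j = p(j)'
-- (fuel = n is a pure totality guard; the loop stops within n steps, proved below)
def pvCollect (n : Nat) (seen : List Bool) (cyc : List Nat) (j : Nat) : Nat → List Bool × List Nat
  | 0 => (seen, cyc)
  | fuel + 1 =>
    if ¬ seen.getD j false then pvCollect n (seen.set j true) (cyc ++ [j]) (pvP n j) fuel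
    else (seen, cyc)

-- 'for idx in range(L): res[cyc[idx]] = S[cyc[(idx + r) % L]]'
def pvFill (cs : List Char) (cyc : List Nat) (r : Nat) (res : List Char) : List Char :=
  (List.range cyc.length).foldl (fun res idx =>
    res.set (cyc.getD idx 0) (cs.getD (cyc.getD ((idx + r) % cyc.length) 0) default)) res

-- the body of 'for i in range(n)' acting on the state (seen, res)
def pvOuter (K : Int) (cs : List Char) (st : List Bool × List Char) (i : Nat) : List Bool × List Char :=
  if ¬ st.1.getD i false then
    let sc := pvCollect cs.length st.1 [] i cs.length
    let r := (PySem.Int.mod K (sc.2.length : Int)).toNat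
    (sc.1, pvFill cs sc.2 r st.2)
  else st

def find_original_string_alt (K : Int) (S : String) : String :=
  let cs := S.toList
  let n : Int := PySem.Chars.len cs
  if K ≤ 0 ∨ n ≤ 1 then S
  else
    String.ofList (((List.range cs.length).foldl (pvOuter K cs)
      (List.replicate cs.length false, List.replicate cs.length default)).2)

-- ===== PRECONDITION & SPEC =====
def Spec_find_original_string (K : Int) (S : String) (out : String) : Prop := out = find_original_string_alt K S
instance (K : Int) (S : String) (out : String) : Decidable (Spec_find_original_string K S out) := by unfold Spec_find_original_string; infer_instance

-- ===== CLAIM (what is proved, stated in full; the proofs are below) =====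
def Claim_equal_find_original_string : Prop := ∀ (K : Int) (S : String), Dom_find_original_string K S → Spec_find_original_string K S (find_original_string K S)

-- ===== LEMMAS AND PROOFS =====

theorem pvP_lt {n i : Nat} (h : i < n) : pvP n i < n := by
  unfold pvP; split_ifs <;> omega

theorem pvP_inj {n i j : Nat} (hi : i < n) (hj : j < n) (h : pvP n i = pvP n j) : i = j := by
  unfold pvP at h; split_ifs at h <;> omega

theorem iter_pvP_lt {n : Nat} (k : Nat) {i : Nat} (h : i < n) : (pvP n)^[k] i < n := by
  induction k generalizing i with
  | zero => simpa using h
  | succ k ih => rw [Function.iterate_succ_apply]; exact ih (pvP_lt h)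

theorem iter_pvP_cancel {n : Nat} (k : Nat) {x y : Nat} (hx : x < n) (hy : y < n)
    (h : (pvP n)^[k] x = (pvP n)^[k] y) : x = y := by
  induction k generalizing x y with
  | zero => simpa using h
  | succ k ih =>
    rw [Function.iterate_succ_apply, Function.iterate_succ_apply] at h
    exact pvP_inj hx hy (ih (pvP_lt hx) (pvP_lt hy) h)

theorem exists_cycle {n i : Nat} (h : i < n) : ∃ L, 1 ≤ L ∧ L ≤ n ∧ (pvP n)^[L] i = i := by
  have hmap : ∀ k ∈ Finset.range (n + 1), (pvP n)^[k] i ∈ Finset.range n := by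
    intro k _; exact Finset.mem_range.mpr (iter_pvP_lt k h)
  obtain ⟨a, ha, b, hb, hne, heq⟩ :=
    Finset.exists_ne_map_eq_of_card_lt_of_maps_to (by simp) hmap
  rw [Finset.mem_range] at ha hb
  rcases Nat.lt_or_ge a b with hab | hab
  · refine ⟨b - a, by omega, by omega, ?_⟩
    have h2 : (pvP n)^[a + (b - a)] i = (pvP n)^[a] ((pvP n)^[b - a] i) := Function.iterate_add_apply _ _ _ _
    rw [show a + (b - a) = b by omega] at h2
    exact iter_pvP_cancel a (iter_pvP_lt _ h) h (by rw [← h2, ← heq])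
  · have hba : b < a := by omega
    refine ⟨a - b, by omega, by omega, ?_⟩
    have h2 : (pvP n)^[b + (a - b)] i = (pvP n)^[b] ((pvP n)^[a - b] i) := Function.iterate_add_apply _ _ _ _
    rw [show b + (a - b) = a by omega] at h2
    exact iter_pvP_cancel b (iter_pvP_lt _ h) h (by rw [← h2, heq])

theorem iterate_mod {α : Type} (f : α → α) (x : α) (d : Nat) (hd : 0 < d)
    (hfix : f^[d] x = x) : ∀ m, f^[m] x = f^[m % d] x := by
  intro m
  induction m using Nat.strong_induction_on with
  | _ m ih =>
    rcases Nat.lt_or_ge m d with hm | hm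
    · rw [Nat.mod_eq_of_lt hm]
    · have h1 : f^[m] x = f^[m - d] x := by
        have h2 : f^[(m - d) + d] x = f^[m - d] (f^[d] x) := Function.iterate_add_apply _ _ _ _
        rw [show (m - d) + d = m by omega] at h2
        rw [h2, hfix]
      rw [h1, ih (m - d) (by omega), (Nat.mod_eq_sub_mod hm).symm]

theorem toNat_emod_natCast (K : Int) (r : Nat) (h : 0 ≤ K) : (K % (r : Int)).toNat = K.toNat % r := by
  obtain ⟨m, rfl⟩ : ∃ m : Nat, K = (m : Int) := ⟨K.toNat, by omega⟩
  rw [show ((m : Int) % (r : Int)) = ((m % r : Nat) : Int) from (Int.natCast_mod m r).symm]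
  exact Int.toNat_natCast _

-- filterMap over in-range indices is a map of getD
theorem filterMap_getElem (cs : List Char) (d : Char) (f : Nat → Int) (c : Nat)
    (h : ∀ k < c, 0 ≤ f k ∧ (f k).toNat < cs.length) :
    (List.range c).filterMap (fun k => cs[(f k).toNat]?) =
      (List.range c).map (fun k => cs.getD (f k).toNat d) := by
  rw [List.filterMap_congr (g := fun k => some (cs.getD (f k).toNat d)) ?_]
  · rw [show (fun k => some (cs.getD (f k).toNat d)) = some ∘ (fun k => cs.getD (f k).toNat d) from rfl,
      List.filterMap_eq_map]
  · intro k hk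
    have hk' := h k (List.mem_range.mp hk)
    rw [List.getElem?_eq_getElem hk'.2]
    show some cs[(f k).toNat] = some (cs.getD (f k).toNat d)
    rw [List.getD_eq_getElem cs d hk'.2]

theorem getD_range_map (cs : List Char) (d : Char) :
    (List.range cs.length).map (fun i => cs.getD i d) = cs := by
  apply List.ext_getElem (by simp)
  intro i h1 h2
  simp only [List.getElem_map, List.getElem_range]
  exact List.getD_eq_getElem cs d h2

theorem sliceA (cs : List Char) :
    (PySem.List.slice? cs none none 2).getD [] =
      (List.range ((cs.length + 1) / 2)).map (fun k => cs.getD (2 * k) default) := by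
  simp only [PySem.List.slice?, PySem.List.sliceIndices]
  norm_num
  rw [show (if 0 < cs.length then (((cs.length : Int) + 2 - 1) / 2).toNat else 0) = (cs.length+1)/2 by
        split_ifs <;> omega]
  rw [filterMap_getElem cs default (fun k => 2*(k:Int)) ((cs.length+1)/2) (by intro k hk; beta_reduce; omega)]
  apply List.map_congr_left; intro k hk
  have := List.mem_range.mp hk
  rw [List.getD_eq_getElem?_getD, show ((2:Int)*(k:Nat)).toNat = 2*k by omega]

theorem sliceB (cs : List Char) (he : cs.length % 2 = 0) :
    (PySem.List.slice? cs (some (-1)) none (-2)).getD [] =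
      (List.range (cs.length / 2)).map (fun k => cs.getD (cs.length - 1 - 2 * k) default) := by
  simp only [PySem.List.slice?, PySem.List.sliceIndices]
  norm_num
  rw [show (if 0 < cs.length then (((cs.length : Int) + 2 - 1) / 2).toNat else 0) = cs.length/2 by
        split_ifs <;> omega]
  rw [filterMap_getElem cs default (fun k => -1 + (cs.length:Int) + -(2*(k:Int))) (cs.length/2)
        (by intro k hk; beta_reduce; constructor <;> omega)]
  apply List.map_congr_left; intro k hk
  have := List.mem_range.mp hk
  rw [List.getD_eq_getElem?_getD, show ((-1:Int) + (cs.length:Int) + -(2*(k:Int))).toNat = cs.length - 1 - 2*k by omega]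

theorem sliceC (cs : List Char) (ho : cs.length % 2 = 1) :
    (PySem.List.slice? cs (some (-2)) none (-2)).getD [] =
      (List.range (cs.length / 2)).map (fun k => cs.getD (cs.length - 2 - 2 * k) default) := by
  simp only [PySem.List.slice?, PySem.List.sliceIndices]
  norm_num
  rw [show (if 1 < cs.length then ((max (-2 + (cs.length:Int)) (-1) + 1 + 2 - 1) / 2).toNat else 0) = cs.length/2 by
        split_ifs <;> omega]
  rw [filterMap_getElem cs default (fun k => max (-2 + (cs.length:Int)) (-1) + -(2*(k:Int))) (cs.length/2)
        (by intro k hk; beta_reduce; constructor <;> omega)]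
  apply List.map_congr_left; intro k hk
  have := List.mem_range.mp hk
  rw [List.getD_eq_getElem?_getD, show (max (-2 + (cs.length:Int)) (-1) + -(2*(k:Int))).toNat = cs.length - 2 - 2*k by omega]

-- one inverted_swap is exactly the index permutation pvP
theorem invSwap_eq_map (cs : List Char) :
    pvInvertedSwap cs = (List.range cs.length).map (fun i => cs.getD (pvP cs.length i) default) := by
  have hsplit : cs.length = (cs.length + 1) / 2 + cs.length / 2 := by omega
  have hmod : PySem.Int.mod (PySem.Chars.len cs) 2 = ((cs.length % 2 : Nat) : Int) := by
    rw [PySem.Chars.len_eq]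
    exact_mod_cast PySem.Int.mod_natCast cs.length 2
  unfold pvInvertedSwap
  rcases Nat.even_or_odd cs.length with he | ho
  · have he' : cs.length % 2 = 0 := Nat.even_iff.mp he
    rw [if_pos (by rw [hmod, he']; rfl), sliceA, sliceB cs he']
    conv_rhs => rw [hsplit, List.range_add, List.map_append]
    congr 1
    · apply List.map_congr_left; intro k hk
      have := List.mem_range.mp hk
      unfold pvP; rw [if_pos (by omega)]
    · rw [List.map_map]
      apply List.map_congr_left; intro k hk
      have := List.mem_range.mp hk
      simp only [Function.comp_apply]
      unfold pvP; rw [if_neg (by omega)]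
      congr 1; omega
  · have ho' : cs.length % 2 = 1 := Nat.odd_iff.mp ho
    rw [if_neg (by rw [hmod, ho']; decide), sliceA, sliceC cs ho']
    conv_rhs => rw [hsplit, List.range_add, List.map_append]
    congr 1
    · apply List.map_congr_left; intro k hk
      have := List.mem_range.mp hk
      unfold pvP; rw [if_pos (by omega)]
    · rw [List.map_map]
      apply List.map_congr_left; intro k hk
      have := List.mem_range.mp hk
      simp only [Function.comp_apply]
      unfold pvP; rw [if_neg (by omega)]
      congr 1; omega

theorem iterate_invSwap (cs : List Char) (k : Nat) :
    pvInvertedSwap^[k] cs =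
      (List.range cs.length).map (fun i => cs.getD ((pvP cs.length)^[k] i) default) := by
  induction k with
  | zero =>
    simp only [Function.iterate_zero_apply]
    exact (getD_range_map cs default).symm
  | succ k ih =>
    rw [Function.iterate_succ_apply', ih, invSwap_eq_map]
    simp only [List.length_map, List.length_range]
    apply List.map_congr_left; intro i hi
    have hi' := List.mem_range.mp hi
    have hp := pvP_lt hi'
    rw [List.getD_eq_getElem _ _ (by simpa using hp)]
    simp only [List.getElem_map, List.getElem_range]
    rw [Function.iterate_succ_apply]

-- the A loop computes the plain K-fold iterate
theorem loopA_eq (K : Int) : ∀ (cd : Nat) (S orig : List Char),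
    pvInvertedSwap^[cd] orig = S → pvLoopA K S orig cd = pvInvertedSwap^[K.toNat] S := by
  induction K using (measure Int.toNat).wf.induction with
  | _ K ih =>
    intro cd S orig hS
    rcases lt_or_ge 0 K with hK | hK
    · rw [pvLoopA, dif_pos hK]
      have hb : (0:Int) < (cd : Int) + 1 := by positivity
      have hS' : pvInvertedSwap^[cd + 1] orig = pvInvertedSwap S := by
        rw [Function.iterate_succ_apply', hS]
      split_ifs with heq
      · have h0 := PySem.Int.mod_nonneg (K - 1) hb
        have hlt : (PySem.Int.mod (K - 1) ((cd : Int) + 1)).toNat < K.toNat := by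
          have h1 : PySem.Int.mod (K - 1) ((cd : Int) + 1) ≤ K - 1 := by
            rw [PySem.Int.mod_eq_emod_of_pos hb]
            rcases lt_or_ge (K - 1) ((cd : Int) + 1) with h3 | h3
            · rw [Int.emod_eq_of_lt (by omega) h3]
            · have := Int.emod_lt_of_pos (K - 1) hb; omega
          omega
        rw [ih _ hlt (cd + 1) _ orig hS']
        have hfix : pvInvertedSwap^[cd + 1] (pvInvertedSwap S) = pvInvertedSwap S := by
          conv_lhs => rw [heq]
          rw [hS', heq]
        have hmodnat : (PySem.Int.mod (K - 1) ((cd : Int) + 1)).toNat = (K - 1).toNat % (cd + 1) := by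
          rw [PySem.Int.mod_eq_emod_of_pos hb,
            show (cd : Int) + 1 = (((cd + 1 : Nat)) : Int) from by push_cast; ring]
          exact toNat_emod_natCast (K - 1) (cd + 1) (by omega)
        rw [hmodnat, ← iterate_mod _ _ (cd + 1) (by omega) hfix]
        rw [show K.toNat = (K - 1).toNat + 1 by omega, Function.iterate_succ_apply]
      · have hlt : (K - 1).toNat < K.toNat := by omega
        rw [ih _ hlt (cd + 1) _ orig hS']
        rw [show K.toNat = (K - 1).toNat + 1 by omega, Function.iterate_succ_apply]
    · rw [pvLoopA, dif_neg (by omega)]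
      rw [show K.toNat = 0 by omega, Function.iterate_zero_apply]

theorem getD_set_eq {α : Type} (l : List α) (a b : Nat) (v d : α) (h : a < l.length) :
    (l.set a v).getD b d = if b = a then v else l.getD b d := by
  by_cases hb : b = a
  · subst hb; simp [List.getD_eq_getElem?_getD, h]
  · simp [List.getD_eq_getElem?_getD, hb, Ne.symm hb]

theorem getD_replicate_self {α : Type} (L q : Nat) (d : α) : (List.replicate L d).getD q d = d := by
  rw [List.getD_eq_getElem?_getD, List.getElem?_replicate]
  split_ifs <;> rfl

theorem least_cycle {n i : Nat} (h : i < n) :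
    ∃ L, 0 < L ∧ L ≤ n ∧ (pvP n)^[L] i = i ∧ ∀ m, 0 < m → m < L → (pvP n)^[m] i ≠ i := by
  obtain ⟨Lc, h1, h2, h3⟩ := exists_cycle h
  have hex : ∃ L, 0 < L ∧ (pvP n)^[L] i = i := ⟨Lc, by omega, h3⟩
  refine ⟨Nat.find hex, (Nat.find_spec hex).1, ?_, (Nat.find_spec hex).2, ?_⟩
  · exact le_trans (Nat.find_min' hex ⟨by omega, h3⟩) h2
  · intro m hm1 hm2 hfix
    exact absurd ⟨hm1, hfix⟩ (Nat.find_min hex hm2)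

theorem iter_distinct {n i L0 : Nat} (hi : i < n)
    (hmin : ∀ m, 0 < m → m < L0 → (pvP n)^[m] i ≠ i) :
    ∀ u t, u < t → t < L0 → (pvP n)^[t] i ≠ (pvP n)^[u] i := by
  intro u t hu ht heq
  have h1 : (pvP n)^[u] ((pvP n)^[t - u] i) = (pvP n)^[u] i := by
    rw [← Function.iterate_add_apply, show u + (t - u) = t by omega, heq]
  exact hmin (t - u) (by omega) (by omega)
    (iter_pvP_cancel u (iter_pvP_lt _ hi) hi h1)

theorem orb_symm {n i L0 : Nat} (hL0 : 0 < L0) (hfix : (pvP n)^[L0] i = i) (a : Nat) :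
    ∃ b, (pvP n)^[b] ((pvP n)^[a] i) = i := by
  refine ⟨L0 - a % L0, ?_⟩
  rw [← Function.iterate_add_apply]
  have hd := Nat.div_add_mod a L0
  have hml := Nat.mod_lt a hL0
  have h2 : L0 * (a / L0 + 1) = L0 * (a / L0) + L0 := by ring
  rw [show L0 - a % L0 + a = L0 * (a / L0 + 1) by omega, Function.iterate_mul]
  exact Function.iterate_fixed hfix _

-- the marking the inner while loop performs on 'seen'
def markL (s : List Bool) (g : Nat → Nat) (t : Nat) : List Bool :=
  (List.range t).foldl (fun s' u => s'.set (g u) true) s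

theorem markL_succ (s : List Bool) (g : Nat → Nat) (t : Nat) :
    markL s g (t + 1) = (markL s g t).set (g t) true := by
  unfold markL; rw [List.range_succ, List.foldl_append]; rfl

theorem markL_length (s : List Bool) (g : Nat → Nat) (t : Nat) :
    (markL s g t).length = s.length := by
  induction t with
  | zero => rfl
  | succ t ih => rw [markL_succ, List.length_set, ih]

theorem markL_getD (s : List Bool) (g : Nat → Nat) (hg : ∀ u, g u < s.length) (t q : Nat) :
    (markL s g t).getD q false = true ↔ (∃ u < t, g u = q) ∨ s.getD q false = true := by
  induction t with
  | zero => simp [markL]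
  | succ t ih =>
    rw [markL_succ, getD_set_eq _ _ _ _ _ (by rw [markL_length]; exact hg t)]
    by_cases hq : q = g t
    · subst hq
      rw [if_pos rfl]
      constructor
      · intro _; exact Or.inl ⟨t, by omega, rfl⟩
      · intro _; rfl
    · rw [if_neg hq, ih]
      constructor
      · rintro (⟨u, hu, he⟩ | hs)
        · exact Or.inl ⟨u, by omega, he⟩
        · exact Or.inr hs
      · rintro (⟨u, hu, he⟩ | hs)
        · rcases Nat.lt_or_ge u t with h | h
          · exact Or.inl ⟨u, h, he⟩
          · have hut : u = t := by omega
            subst hut; exact absurd he.symm hq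
        · exact Or.inr hs

-- the inner while loop collects exactly the cycle of i and marks it
theorem collect_spec (n i : Nat) (s : List Bool) (L0 : Nat)
    (hi : i < n) (hs : s.length = n)
    (hL0 : 0 < L0) (hfix : (pvP n)^[L0] i = i)
    (hmin : ∀ m, 0 < m → m < L0 → (pvP n)^[m] i ≠ i)
    (hdisj : ∀ a, s.getD ((pvP n)^[a] i) false = false) :
    ∀ (fuel t : Nat) (cyc0 : List Nat), t ≤ L0 → L0 - t ≤ fuel →
      pvCollect n (markL s (fun u => (pvP n)^[u] i) t)
          (cyc0 ++ (List.range t).map (fun u => (pvP n)^[u] i)) ((pvP n)^[t] i) fuel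
        = (markL s (fun u => (pvP n)^[u] i) L0,
           cyc0 ++ (List.range L0).map (fun u => (pvP n)^[u] i)) := by
  have hg : ∀ u, (fun u => (pvP n)^[u] i) u < s.length := by
    intro u; rw [hs]; exact iter_pvP_lt u hi
  intro fuel
  induction fuel with
  | zero =>
    intro t cyc0 ht hf
    have ht' : t = L0 := by omega
    subst ht'; rfl
  | succ fuel ih =>
    intro t cyc0 ht hf
    rcases Nat.eq_or_lt_of_le ht with he | hlt
    · rw [he]
      have hseen : (markL s (fun u => (pvP n)^[u] i) L0).getD ((pvP n)^[L0] i) false = true := by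
        rw [hfix]
        exact (markL_getD s _ hg L0 i).mpr (Or.inl ⟨0, hL0, rfl⟩)
      rw [pvCollect, if_neg (not_not_intro hseen)]
    · have hcond : ¬ ((markL s (fun u => (pvP n)^[u] i) t).getD ((pvP n)^[t] i) false = true) := by
        rw [markL_getD s _ hg t]
        rintro (⟨u, hu, he⟩ | hsd)
        · exact iter_distinct hi hmin u t hu hlt he.symm
        · rw [hdisj t] at hsd; exact Bool.false_ne_true hsd
      rw [pvCollect, if_pos hcond]
      rw [show (markL s (fun u => (pvP n)^[u] i) t).set ((pvP n)^[t] i) true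
            = markL s (fun u => (pvP n)^[u] i) (t + 1) from (markL_succ _ _ t).symm]
      rw [show (cyc0 ++ (List.range t).map (fun u => (pvP n)^[u] i)) ++ [(pvP n)^[t] i]
            = cyc0 ++ (List.range (t + 1)).map (fun u => (pvP n)^[u] i) by
          rw [List.append_assoc, List.range_succ, List.map_append]
          rfl]
      rw [show pvP n ((pvP n)^[t] i) = (pvP n)^[t + 1] i from (Function.iterate_succ_apply' _ _ _).symm]
      exact ih (t + 1) cyc0 (by omega) (by omega)

-- the assignment loop, rephrased on iterates of the permutation
def fillGo (cs : List Char) (i n L0 r : Nat) (res : List Char) (m : Nat) : List Char :=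
  (List.range m).foldl (fun res idx =>
    res.set ((pvP n)^[idx] i) (cs.getD ((pvP n)^[(idx + r) % L0] i) default)) res

theorem fill_eq (cs : List Char) (n i L0 r : Nat) (hL0 : 0 < L0) (res : List Char) :
    pvFill cs ((List.range L0).map (fun u => (pvP n)^[u] i)) r res
      = fillGo cs i n L0 r res L0 := by
  unfold pvFill fillGo
  rw [show ((List.range L0).map (fun u => (pvP n)^[u] i)).length = L0 by simp]
  apply PySem.List.foldl_congr_mem
  intro acc x hx
  have hxL := List.mem_range.mp hx
  rw [show ((List.range L0).map (fun u => (pvP n)^[u] i)).getD x 0 = (pvP n)^[x] i by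
        rw [List.getD_eq_getElem _ _ (by simpa using hxL)]; simp]
  rw [show ((List.range L0).map (fun u => (pvP n)^[u] i)).getD ((x + r) % L0) 0
        = (pvP n)^[(x + r) % L0] i by
        rw [List.getD_eq_getElem _ _ (by simpa using Nat.mod_lt (x + r) hL0)]; simp]

theorem fillGo_succ (cs : List Char) (i n L0 r : Nat) (res : List Char) (m : Nat) :
    fillGo cs i n L0 r res (m + 1)
      = (fillGo cs i n L0 r res m).set ((pvP n)^[m] i)
          (cs.getD ((pvP n)^[(m + r) % L0] i) default) := by
  unfold fillGo; rw [List.range_succ, List.foldl_append]; rfl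

theorem fillGo_length (cs : List Char) (i n L0 r : Nat) (res : List Char) (m : Nat) :
    (fillGo cs i n L0 r res m).length = res.length := by
  induction m with
  | zero => rfl
  | succ m ih => rw [fillGo_succ, List.length_set, ih]

theorem fillGo_getD (cs : List Char) (i n L0 r K' : Nat) (res : List Char)
    (hi : i < n) (hres : res.length = n)
    (hL0 : 0 < L0) (hfix : (pvP n)^[L0] i = i) (hr : r = K' % L0) :
    ∀ m, m ≤ L0 → ∀ q, (fillGo cs i n L0 r res m).getD q default
      = if ∃ u < m, (pvP n)^[u] i = q then cs.getD ((pvP n)^[K'] q) default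
        else res.getD q default := by
  intro m
  induction m with
  | zero =>
    intro _ q
    rw [if_neg (by rintro ⟨u, hu, _⟩; omega)]
    rfl
  | succ m ih =>
    intro hm q
    rw [fillGo_succ, getD_set_eq _ _ _ _ _
      (by rw [fillGo_length, hres]; exact iter_pvP_lt m hi)]
    by_cases hq : q = (pvP n)^[m] i
    · rw [if_pos hq, if_pos ⟨m, by omega, hq.symm⟩, hq]
      congr 1
      have e1 : (m + r) % L0 = (K' + m) % L0 := by
        rw [hr, Nat.add_mod_mod, Nat.add_comm]
      rw [e1, show (pvP n)^[(K' + m) % L0] i = (pvP n)^[K' + m] i from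
            (iterate_mod _ _ L0 hL0 hfix _).symm, Function.iterate_add_apply]
    · rw [if_neg hq, ih (by omega) q]
      by_cases hex : ∃ u < m, (pvP n)^[u] i = q
      · obtain ⟨u, hu, he⟩ := hex
        rw [if_pos ⟨u, hu, he⟩, if_pos ⟨u, by omega, he⟩]
      · rw [if_neg hex, if_neg (by
          rintro ⟨u, hu, he⟩
          rcases Nat.lt_or_ge u m with h | h
          · exact hex ⟨u, h, he⟩
          · have hum : u = m := by omega
            subst hum; exact hq he.symm)]

-- invariant of the outer 'for i in range(n)' loop
def pvInv (K : Int) (cs : List Char) (m : Nat) (st : List Bool × List Char) : Prop :=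
  st.1.length = cs.length ∧ st.2.length = cs.length ∧
  (∀ q, q < cs.length →
    (st.1.getD q false = true ↔ ∃ t, t < m ∧ ∃ a, (pvP cs.length)^[a] t = q)) ∧
  (∀ q, q < cs.length → st.1.getD q false = true →
    st.2.getD q default = cs.getD ((pvP cs.length)^[K.toNat] q) default)

theorem outer_inv (K : Int) (cs : List Char) (hK : 0 ≤ K) :
    ∀ m, m ≤ cs.length →
      pvInv K cs m (List.foldl (pvOuter K cs)
        (List.replicate cs.length false, List.replicate cs.length default) (List.range m)) := by
  intro m
  induction m with
  | zero =>
    intro _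
    simp only [List.range_zero, List.foldl_nil]
    refine ⟨by simp, by simp, ?_, ?_⟩
    · intro q hq
      constructor
      · intro ht
        rw [getD_replicate_self] at ht
        exact absurd ht Bool.false_ne_true
      · rintro ⟨t, ht, _⟩; omega
    · intro q hq ht
      rw [getD_replicate_self] at ht
      exact absurd ht Bool.false_ne_true
  | succ m ih =>
    intro hm1
    obtain ⟨hlen1, hlen2, hiff, hres⟩ := ih (by omega)
    rw [List.range_succ, List.foldl_append, List.foldl_cons, List.foldl_nil]
    generalize hst : List.foldl (pvOuter K cs)
      (List.replicate cs.length false, List.replicate cs.length default) (List.range m) = st at *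
    have hmn : m < cs.length := by omega
    by_cases hseen : st.1.getD m false = true
    · rw [pvOuter, if_neg (not_not_intro hseen)]
      refine ⟨hlen1, hlen2, ?_, hres⟩
      intro q hq
      rw [hiff q hq]
      constructor
      · rintro ⟨t, ht, a, ha⟩; exact ⟨t, by omega, a, ha⟩
      · rintro ⟨t, ht, a, ha⟩
        rcases Nat.lt_or_ge t m with h | h
        · exact ⟨t, h, a, ha⟩
        · have htm : t = m := by omega
          subst htm
          obtain ⟨t0, ht0, b, hb⟩ := (hiff t hmn).mp hseen
          exact ⟨t0, ht0, a + b, by rw [Function.iterate_add_apply, hb, ha]⟩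
    · have hseenf : st.1.getD m false = false := by
        cases hx : st.1.getD m false
        · rfl
        · exact absurd hx hseen
      rw [pvOuter, if_pos (by rw [hseenf]; exact Bool.false_ne_true)]
      obtain ⟨L0, hL0, hL0n, hfix, hmin⟩ := least_cycle hmn
      have hg : ∀ u, (fun u => (pvP cs.length)^[u] m) u < st.1.length := by
        intro u; rw [hlen1]; exact iter_pvP_lt u hmn
      have hdisj : ∀ a, st.1.getD ((pvP cs.length)^[a] m) false = false := by
        intro a
        cases hx : st.1.getD ((pvP cs.length)^[a] m) false
        · rfl
        · exfalso
          obtain ⟨t0, ht0, b, hb⟩ := (hiff _ (iter_pvP_lt a hmn)).mp hx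
          obtain ⟨c, hc⟩ := orb_symm hL0 hfix a
          exact hseen ((hiff m hmn).mpr
            ⟨t0, ht0, c + b, by rw [Function.iterate_add_apply, hb, hc]⟩)
      have hcol : pvCollect cs.length st.1 [] m cs.length
          = (markL st.1 (fun u => (pvP cs.length)^[u] m) L0,
             (List.range L0).map (fun u => (pvP cs.length)^[u] m)) := by
        have h0 := collect_spec cs.length m st.1 L0 hmn hlen1 hL0 hfix hmin hdisj
          cs.length 0 [] (by omega) (by omega)
        simpa [markL] using h0
      dsimp only
      rw [hcol]
      dsimp only
      rw [show ((List.range L0).map (fun u => (pvP cs.length)^[u] m)).length = L0 by simp]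
      have hrK : (PySem.Int.mod K ((L0 : Nat) : Int)).toNat = K.toNat % L0 := by
        rw [PySem.Int.mod_eq_emod_of_pos (by exact_mod_cast hL0)]
        exact toNat_emod_natCast K L0 hK
      rw [hrK, fill_eq cs cs.length m L0 (K.toNat % L0) hL0 st.2]
      refine ⟨by rw [markL_length]; exact hlen1,
              by rw [fillGo_length]; exact hlen2, ?_, ?_⟩
      · intro q hq
        rw [markL_getD st.1 _ hg L0 q, hiff q hq]
        constructor
        · rintro (⟨u, hu, he⟩ | ⟨t, ht, a, ha⟩)
          · exact ⟨m, by omega, u, he⟩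
          · exact ⟨t, by omega, a, ha⟩
        · rintro ⟨t, ht, a, ha⟩
          rcases Nat.lt_or_ge t m with h | h
          · exact Or.inr ⟨t, h, a, ha⟩
          · have htm : t = m := by omega
            subst htm
            exact Or.inl ⟨a % L0, Nat.mod_lt a hL0,
              by rw [← ha]; exact (iterate_mod _ _ L0 hL0 hfix a).symm⟩
      · intro q hq hqt
        rw [fillGo_getD cs m cs.length L0 (K.toNat % L0) K.toNat st.2
              hmn hlen2 hL0 hfix rfl L0 (le_refl L0) q]
        by_cases hex : ∃ u < L0, (pvP cs.length)^[u] m = q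
        · rw [if_pos hex]
        · rw [if_neg hex]
          rcases (markL_getD st.1 _ hg L0 q).mp hqt with ⟨u, hu, he⟩ | hold
          · exact absurd ⟨u, hu, he⟩ hex
          · exact hres q hq hold

theorem alt_eval (K : Int) (cs : List Char) (hK : 0 ≤ K) :
    (List.foldl (pvOuter K cs)
        (List.replicate cs.length false, List.replicate cs.length default) (List.range cs.length)).2
      = (List.range cs.length).map (fun q => cs.getD ((pvP cs.length)^[K.toNat] q) default) := by
  obtain ⟨h1, h2, hiff, hres⟩ := outer_inv K cs hK cs.length (le_refl _)
  apply List.ext_getElem (by rw [h2]; simp)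
  intro q hq1 hq2
  have hq : q < cs.length := by rw [← h2]; exact hq1
  have hseen := (hiff q hq).mpr ⟨q, hq, 0, rfl⟩
  have hval := hres q hq hseen
  rw [show (List.foldl (pvOuter K cs)
        (List.replicate cs.length false, List.replicate cs.length default)
        (List.range cs.length)).2[q] = (List.foldl (pvOuter K cs)
        (List.replicate cs.length false, List.replicate cs.length default)
        (List.range cs.length)).2.getD q default from (List.getD_eq_getElem _ _ hq1).symm, hval]
  simp

-- ===== VERDICT (by name: the statement is the Claim_ definition above) =====
theorem find_original_string_spec : Claim_equal_find_original_string := by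
  unfold Claim_equal_find_original_string Spec_find_original_string
  intro K S _
  unfold find_original_string find_original_string_alt
  dsimp only
  set cs := S.toList with hcs
  have hA : pvLoopA K cs cs 0 = pvInvertedSwap^[K.toNat] cs :=
    loopA_eq K 0 cs cs (by simp)
  rcases lt_or_ge 0 K with hK | hK
  swap
  · rw [if_pos (Or.inl (by omega)), hA]
    rw [show K.toNat = 0 by omega, Function.iterate_zero_apply, hcs, String.ofList_toList]
  · rcases lt_or_ge 1 cs.length with hn | hn
    swap
    · rw [if_pos (Or.inr (by rw [PySem.Chars.len_eq]; exact_mod_cast hn)), hA]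
      have hfix : pvInvertedSwap cs = cs := by
        rw [invSwap_eq_map]
        rcases Nat.lt_or_ge cs.length 1 with h1 | h1
        · have h0 : cs.length = 0 := by omega
          simp [List.length_eq_zero_iff.mp h0]
        · have h0 : cs.length = 1 := by omega
          rw [show (List.range cs.length).map (fun i => cs.getD (pvP cs.length i) default)
                = (List.range cs.length).map (fun i => cs.getD i default) from ?_, getD_range_map]
          apply List.map_congr_left; intro k hk
          have := List.mem_range.mp hk
          unfold pvP
          rw [if_pos (by omega)]
          congr 1; omega
      rw [Function.iterate_fixed hfix, hcs, String.ofList_toList]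
    · rw [if_neg (by
        rintro (h | h)
        · omega
        · rw [PySem.Chars.len_eq] at h; omega)]
      rw [hA, iterate_invSwap, alt_eval K cs (by omega)]
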